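-- pv_equiv track=rewrite | github.com/slfyzz/8-Game-solver | src/main.py | createGoal
-- ===== SOURCE A (Python) =====
-- def createGoal(n, m):
--     goal = []
--     for i in range(n):
--         row = []
--         for j in range(m):
--             row.append(i * m + j)
--         goal.append(tuple(row))
--     return tuple(goal)
-- ===== SOURCE B (Python) =====
-- def createGoal(n, m):
--     flat = range(n * m)
--     return tuple(tuple(flat[i * m:(i + 1) * m]) for i in range(n))
-- ===== Notes on version B (the rewrite author's own statement) =====
-- stated objective: alternative
-- what changed: B builds one flat lazy range(n*m) and partitions it into n consecutive slices of length m, instead of recomputing i*m+j in a nested append loop.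
import Mathlib
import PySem

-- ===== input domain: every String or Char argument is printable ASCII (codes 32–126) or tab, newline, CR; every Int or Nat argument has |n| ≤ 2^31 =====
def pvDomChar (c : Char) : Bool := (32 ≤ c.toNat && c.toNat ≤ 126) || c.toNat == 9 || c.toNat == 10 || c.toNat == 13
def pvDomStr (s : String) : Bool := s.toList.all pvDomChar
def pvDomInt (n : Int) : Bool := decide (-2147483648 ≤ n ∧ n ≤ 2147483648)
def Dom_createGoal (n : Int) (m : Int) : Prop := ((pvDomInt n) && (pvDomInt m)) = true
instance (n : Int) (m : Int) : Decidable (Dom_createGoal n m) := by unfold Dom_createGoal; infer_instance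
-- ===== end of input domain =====

-- B builds the flat lazy index sequence range(n*m) once and slices it into n consecutive rows
-- of length m instead of recomputing i*m+j in a nested loop (alternative decomposition, same cost).

-- ===== PORT A =====
def createGoal (n : Int) (m : Int) : List (List Int) :=
  (PySem.List.pyRange 0 n 1).foldl (fun goal i =>
    goal ++ [(PySem.List.pyRange 0 m 1).foldl (fun row j => row ++ [i * m + j]) []]) []

-- ===== PORT B =====
-- Exact port of Python's slice-index normalization for a length-L sequence and step 1:
-- negative indices shift by L, then the index is clamped to [0, L].
def pyNormIdx (L i : Int) : Int := min (max (if i < 0 then i + L else i) 0) L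

-- Exact port of tuple(range(N)[a:b]): Python's range object slices lazily, returning
-- range(a', b') with a', b' the normalized indices (range(N) has length max(N,0) and
-- range(N)[k] = k), which tuple() then materializes.
def pyRangeSliceTuple (N a b : Int) : List Int :=
  let L := max N 0
  PySem.List.pyRange (pyNormIdx L a) (pyNormIdx L b) 1

def createGoal_alt (n : Int) (m : Int) : List (List Int) :=
  let flatLen := n * m          -- flat = range(n * m), kept as its length (the range is lazy)
  (PySem.List.pyRange 0 n 1).map (fun i =>
    pyRangeSliceTuple flatLen (i * m) ((i + 1) * m))

-- ===== PRECONDITION & SPEC =====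
def Spec_createGoal (n : Int) (m : Int) (out : List (List Int)) : Prop := out = createGoal_alt n m
instance (n : Int) (m : Int) (out : List (List Int)) : Decidable (Spec_createGoal n m out) := by unfold Spec_createGoal; infer_instance

-- ===== CLAIM (what is proved, stated in full; the proofs are below) =====
def Claim_equal_createGoal : Prop := ∀ (n : Int) (m : Int), Dom_createGoal n m → Spec_createGoal n m (createGoal n m)

-- ===== LEMMAS AND PROOFS =====

-- append-accumulator fold is a map
lemma foldl_append_singleton {α β : Type} (f : α → β) :
    ∀ (l : List α) (acc : List β),
      l.foldl (fun acc x => acc ++ [f x]) acc = acc ++ l.map f := by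
  intro l
  induction l with
  | nil => simp
  | cons x xs ih => intro acc; simp [List.foldl_cons, ih]

theorem createGoal_spec : Claim_equal_createGoal := by
  intro n m _
  unfold Spec_createGoal createGoal createGoal_alt
  rw [foldl_append_singleton]
  simp only [List.nil_append]
  apply List.map_congr_left
  intro i hi
  rw [foldl_append_singleton]
  simp only [List.nil_append]
  have hmem := PySem.List.mem_pyRange_one.mp hi
  by_cases hm : 0 < m
  · have ha : pyNormIdx (max (n * m) 0) (i * m) = i * m := by
      unfold pyNormIdx
      have h1 : 0 ≤ i * m := mul_nonneg hmem.1 (le_of_lt hm)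
      have h2 : i * m ≤ n * m := by nlinarith
      have h3 : 0 ≤ n * m := le_trans h1 h2
      rw [max_eq_left h3]
      split_ifs with h <;> omega
    have hb : pyNormIdx (max (n * m) 0) ((i + 1) * m) = (i + 1) * m := by
      unfold pyNormIdx
      have h1 : 0 ≤ (i + 1) * m := by nlinarith
      have h2 : (i + 1) * m ≤ n * m := by nlinarith
      have h3 : 0 ≤ n * m := le_trans h1 h2
      rw [max_eq_left h3]
      split_ifs with h <;> omega
    simp only [pyRangeSliceTuple]
    rw [ha, hb]
    rw [PySem.List.pyRange_one, PySem.List.pyRange_one]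
    rw [show (i + 1) * m - i * m = m by ring]
    simp
  · have hrow : PySem.List.pyRange 0 m 1 = [] :=
      PySem.List.pyRange_one_eq_nil (by omega)
    have hL : max (n * m) 0 = 0 := by
      have hn : 0 < n := by omega
      have : n * m ≤ 0 := mul_nonpos_of_nonneg_of_nonpos (le_of_lt hn) (le_of_not_gt hm)
      omega
    simp only [pyRangeSliceTuple, pyNormIdx]
    rw [hL]
    simp only [add_zero]
    have h1 : min (max (if i * m < 0 then i * m else i * m) 0) 0 = 0 := by split_ifs <;> omega
    have h2 : min (max (if (i + 1) * m < 0 then (i + 1) * m else (i + 1) * m) 0) 0 = 0 := by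
      split_ifs <;> omega
    rw [h1, h2, hrow, PySem.List.pyRange_one_eq_nil le_rfl]
    simp
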